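-- pv_equiv track=rewrite | github.com/Kishikawa1286/zasshikai202405 | src/utils/latex_to_markdown.py | replace_ampersand_inside_math_env
-- ===== SOURCE A (Python) =====
-- def replace_ampersand_inside_math_env(latex_table: str) -> str:
--     result = []
--     in_math_env = False
--     start_idx = 0
--
--     for idx, char in enumerate(latex_table):
--         if char == '$':
--             in_math_env = not in_math_env
--
--         if in_math_env and char == '&':
--             result.append(latex_table[start_idx:idx] + '__TEMP__AND__')
--             start_idx = idx + 1
--
--     result.append(latex_table[start_idx:])
--     return ''.join(result)
-- ===== SOURCE B (Python) =====
-- def replace_ampersand_inside_math_env(latex_table: str) -> str: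
--     segments = latex_table.split('$')
--     return '$'.join(
--         seg.replace('&', '__TEMP__AND__') if i % 2 == 1 else seg
--         for i, seg in enumerate(segments)
--     )
-- ===== Notes on version B (the rewrite author's own statement) =====
-- stated objective: simpler
-- what changed: Replaces the running toggle-and-slice character scan by: split the string on the math delimiter, replace the ampersands in the odd-indexed (in-math) segments, and join the segments back; the work moves into C-level str.split/str.replace/str.join calls.
import Mathlib
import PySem

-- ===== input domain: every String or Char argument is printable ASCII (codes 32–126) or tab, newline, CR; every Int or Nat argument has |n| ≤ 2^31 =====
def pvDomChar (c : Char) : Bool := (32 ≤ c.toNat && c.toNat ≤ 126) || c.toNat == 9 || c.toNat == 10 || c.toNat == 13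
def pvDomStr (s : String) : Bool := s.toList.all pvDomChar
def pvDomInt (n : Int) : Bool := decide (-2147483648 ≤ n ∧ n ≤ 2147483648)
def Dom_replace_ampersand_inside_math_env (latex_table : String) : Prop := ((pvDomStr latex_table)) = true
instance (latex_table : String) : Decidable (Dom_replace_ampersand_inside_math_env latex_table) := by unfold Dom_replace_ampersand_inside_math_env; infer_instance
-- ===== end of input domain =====

-- B replaces A's running toggle-and-slice character scan by split-on-'$' / process odd segments / join ('simpler'); equal return value on all inputs.

def pvTemp : List Char := ['_','_','T','E','M','P','_','_','A','N','D','_','_']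

-- ===== PORT A =====
-- one step of A's 'for idx, char in enumerate(latex_table)' loop; state = (result, in_math_env, start_idx)
def pvStepA (s : List Char) (st : List (List Char) × Bool × Int) (p : Int × Char) :
    List (List Char) × Bool × Int :=
  let im := if p.2 == '$' then !st.2.1 else st.2.1
  if im && (p.2 == '&') then
    (st.1 ++ [PySem.Chars.slice s (some st.2.2) (some p.1) ++ pvTemp], im, p.1 + 1)
  else
    (st.1, im, st.2.2)

def replace_ampersand_inside_math_env (latex_table : String) : String :=
  let s := latex_table.toList
  let fin := (PySem.List.enumerate s 0).foldl (pvStepA s) ([], false, 0)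
  String.ofList (PySem.Chars.join [] (fin.1 ++ [PySem.Chars.slice s (some fin.2.2) none]))

-- ===== PORT B =====
-- 'seg.replace('&', …) if i % 2 == 1 else seg' for one enumerated segment
def pvProcB (p : Int × List Char) : List Char :=
  if PySem.Int.mod p.1 2 = 1 then PySem.Chars.replace p.2 ['&'] pvTemp else p.2

def replace_ampersand_inside_math_env_alt (latex_table : String) : String :=
  let segments := PySem.Chars.splitOn latex_table.toList ['$']
  String.ofList (PySem.Chars.join ['$'] ((PySem.List.enumerate segments 0).map pvProcB))

-- ===== PRECONDITION & SPEC =====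
def Spec_replace_ampersand_inside_math_env (latex_table : String) (out : String) : Prop := out = replace_ampersand_inside_math_env_alt latex_table
instance (latex_table : String) (out : String) : Decidable (Spec_replace_ampersand_inside_math_env latex_table out) := by unfold Spec_replace_ampersand_inside_math_env; infer_instance

-- ===== CLAIM (what is proved, stated in full; the proofs are below) =====
def Claim_equal_replace_ampersand_inside_math_env : Prop := ∀ (latex_table : String), Dom_replace_ampersand_inside_math_env latex_table → Spec_replace_ampersand_inside_math_env latex_table (replace_ampersand_inside_math_env latex_table)

-- ===== LEMMAS AND PROOFS =====

-- reference function both ports are reduced to: scan with a parity flag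
def pvF : Bool → List Char → List Char
  | _, [] => []
  | p, c :: cs =>
    if c = '$' then '$' :: pvF (!p) cs
    else if p && (c == '&') then pvTemp ++ pvF p cs
    else c :: pvF p cs

def pvSplit : List Char → List (List Char)
  | [] => [[]]
  | c :: cs =>
    if c = '$' then [] :: pvSplit cs
    else match pvSplit cs with
         | [] => [[c]]
         | h :: t => (c :: h) :: t

def pvRepl : List Char → List Char
  | [] => []
  | c :: cs => (if c = '&' then pvTemp else [c]) ++ pvRepl cs

def pvConsHead (w : List Char) : List (List Char) → List (List Char)
  | [] => [w]
  | h :: t => (w ++ h) :: t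

lemma pv_join_nil_left (parts : List (List Char)) :
    PySem.Chars.join [] parts = parts.flatten := by
  induction parts with
  | nil => simp [PySem.Chars.join_nil]
  | cons h t ih =>
    cases t with
    | nil => simp [PySem.Chars.join_singleton]
    | cons h2 t2 =>
      rw [PySem.Chars.join_cons_cons]
      simp [ih]

lemma pv_join_head (sep w h : List Char) (t : List (List Char)) :
    PySem.Chars.join sep ((w ++ h) :: t) = w ++ PySem.Chars.join sep (h :: t) := by
  cases t with
  | nil => simp [PySem.Chars.join_singleton]
  | cons h2 t2 => rw [PySem.Chars.join_cons_cons, PySem.Chars.join_cons_cons]; simp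

lemma pv_replgo (fuel : Nat) (l acc : List Char) (h : l.length ≤ fuel) :
    PySem.Chars.replace.go ['&'] pvTemp fuel l acc = acc.reverse ++ pvRepl l := by
  induction fuel generalizing l acc with
  | zero =>
    have : l = [] := List.eq_nil_of_length_eq_zero (Nat.le_zero.mp h)
    subst this
    simp [PySem.Chars.replace.go, pvRepl]
  | succ n ih =>
    cases l with
    | nil => simp [PySem.Chars.replace.go, pvRepl]
    | cons c t =>
      simp only [PySem.Chars.replace.go]
      by_cases hc : c = '&'
      · subst hc
        have hp : List.isPrefixOf ['&'] ('&' :: t) = true := by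
          simp [List.isPrefixOf]
        rw [if_pos hp]
        have ht : t.length ≤ n := by simpa using h
        rw [ih _ _ (by simpa using ht)]
        simp [pvRepl]
      · have hp : List.isPrefixOf ['&'] (c :: t) = false := by
          simp only [List.isPrefixOf]; simp [Ne.symm hc]
        rw [if_neg (by simp [hp])]
        have ht : t.length ≤ n := by simpa using h
        rw [ih _ _ ht]
        simp [pvRepl, hc]

lemma pv_replace (l : List Char) :
    PySem.Chars.replace l ['&'] pvTemp = pvRepl l := by
  have : (['&'] : List Char).isEmpty = false := by decide
  rw [PySem.Chars.replace, if_neg (by simp [this])]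
  simpa using pv_replgo l.length l [] (le_refl _)

lemma pv_split_ne_nil (l : List Char) : pvSplit l ≠ [] := by
  cases l with
  | nil => simp [pvSplit]
  | cons c cs =>
    by_cases hc : c = '$'
    · simp [pvSplit, hc]
    · simp only [pvSplit, if_neg hc]
      cases pvSplit cs <;> simp

lemma pv_splitgo (fuel : Nat) (l cur : List Char) (acc : List (List Char)) (h : l.length < fuel) :
    PySem.Chars.splitOn.go ['$'] fuel l cur acc = acc.reverse ++ pvConsHead cur.reverse (pvSplit l) := by
  induction fuel generalizing l cur acc with
  | zero => omega
  | succ n ih =>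
    cases l with
    | nil => simp [PySem.Chars.splitOn.go, pvSplit, pvConsHead]
    | cons c t =>
      simp only [PySem.Chars.splitOn.go]
      by_cases hc : c = '$'
      · subst hc
        have hp : List.isPrefixOf ['$'] ('$' :: t) = true := by simp [List.isPrefixOf]
        rw [if_pos hp]
        have ht : t.length < n := by simpa using h
        rw [ih _ _ _ (by simpa using ht)]
        have hne := pv_split_ne_nil t
        cases hs : pvSplit t with
        | nil => exact absurd hs hne
        | cons sh st =>
          simp [pvSplit, pvConsHead, hs]
      · have hp : List.isPrefixOf ['$'] (c :: t) = false := by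
          simp only [List.isPrefixOf]; simp [Ne.symm hc]
        rw [if_neg (by simp [hp])]
        have ht : t.length < n := by simpa using h
        rw [ih _ _ _ ht]
        have hne := pv_split_ne_nil t
        cases hs : pvSplit t with
        | nil => exact absurd hs hne
        | cons sh st =>
          simp [pvSplit, pvConsHead, hs, if_neg hc]

lemma pv_splitOn (l : List Char) : PySem.Chars.splitOn l ['$'] = pvSplit l := by
  rw [PySem.Chars.splitOn, pv_splitgo (l.length + 1) l [] [] (by omega)]
  cases hs : pvSplit l with
  | nil => exact absurd hs (pv_split_ne_nil l)
  | cons sh st => simp [pvConsHead]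

lemma pv_parity_succ (k : Nat) : ((k + 1) % 2 == 1) = !(k % 2 == 1) := by
  rcases Nat.mod_two_eq_zero_or_one k with h | h <;> simp [Nat.add_mod, h]

lemma pv_procB_nat (k : Nat) (seg : List Char) :
    pvProcB ((k : Int), seg) = if k % 2 == 1 then pvRepl seg else seg := by
  unfold pvProcB
  have hm : PySem.Int.mod (k : Int) 2 = ((k % 2 : Nat) : Int) := by
    exact_mod_cast PySem.Int.mod_natCast k 2
  rw [hm]
  rcases Nat.mod_two_eq_zero_or_one k with h | h <;> simp [h, pv_replace]

lemma pvB_join (l : List Char) (k : Nat) :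
    PySem.Chars.join ['$'] ((PySem.List.enumerate (pvSplit l) (k : Int)).map pvProcB)
      = pvF (k % 2 == 1) l := by
  induction l generalizing k with
  | nil =>
    simp only [pvSplit, PySem.List.enumerate_cons, PySem.List.enumerate_nil, List.map_cons,
      List.map_nil]
    rw [pv_procB_nat]
    cases hk : (k % 2 == 1) <;> simp [PySem.Chars.join_singleton, pvF, pvRepl]
  | cons c cs ih =>
    have hne := pv_split_ne_nil cs
    by_cases hc : c = '$'
    · subst hc
      rw [show pvSplit ('$' :: cs) = [] :: pvSplit cs from by simp [pvSplit]]
      cases hs : pvSplit cs with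
      | nil => exact absurd hs hne
      | cons sh st =>
        have hcast : ((k : Int) + 1) = ((k + 1 : Nat) : Int) := by push_cast; ring
        rw [PySem.List.enumerate_cons, List.map_cons, pv_procB_nat k []]
        rw [show (if k % 2 == 1 then pvRepl [] else []) = ([] : List Char) from by
          cases (k % 2 == 1) <;> simp [pvRepl]]
        rw [PySem.List.enumerate_cons, List.map_cons, PySem.Chars.join_cons_cons, hcast]
        have hih := ih (k + 1)
        rw [hs, PySem.List.enumerate_cons, List.map_cons] at hih
        rw [hih, pv_parity_succ]
        simp [pvF]
    · cases hs : pvSplit cs with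
      | nil => exact absurd hs hne
      | cons sh st =>
        rw [show pvSplit (c :: cs) = (c :: sh) :: st from by simp [pvSplit, hc, hs]]
        rw [PySem.List.enumerate_cons, List.map_cons, pv_procB_nat k (c :: sh)]
        have hw : (if k % 2 == 1 then pvRepl (c :: sh) else c :: sh)
            = (if (k % 2 == 1) && (c == '&') then pvTemp else [c])
              ++ (if k % 2 == 1 then pvRepl sh else sh) := by
          cases hk : (k % 2 == 1) <;> by_cases hca : c = '&' <;> simp [pvRepl, hca]
        rw [hw, pv_join_head]
        have hih := ih k
        rw [hs, PySem.List.enumerate_cons, List.map_cons, pv_procB_nat k sh] at hih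
        rw [hih]
        cases hk : (k % 2 == 1) <;> by_cases hca : c = '&' <;>
          simp [pvF, hc, hca]

lemma pvB_eq (s : String) :
    replace_ampersand_inside_math_env_alt s = String.ofList (pvF false s.toList) := by
  have hdef : replace_ampersand_inside_math_env_alt s
      = String.ofList (PySem.Chars.join ['$']
          ((PySem.List.enumerate (PySem.Chars.splitOn s.toList ['$']) (((0 : Nat) : Int))).map pvProcB)) := rfl
  rw [hdef, pv_splitOn, pvB_join s.toList 0]
  rfl

lemma pvA_fold (suf pre : List Char) (r : List (List Char)) (p : Bool) (st : Nat) (h : st ≤ pre.length) :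
    PySem.Chars.join []
      ((((PySem.List.enumerate suf ((pre.length : Nat) : Int)).foldl (pvStepA (pre ++ suf)) (r, p, (st : Int))).1)
        ++ [PySem.Chars.slice (pre ++ suf)
              (some ((PySem.List.enumerate suf ((pre.length : Nat) : Int)).foldl (pvStepA (pre ++ suf)) (r, p, (st : Int))).2.2) none])
      = r.flatten ++ pre.drop st ++ pvF p suf := by
  induction suf generalizing pre r p st with
  | nil =>
    simp only [PySem.List.enumerate_nil, List.foldl_nil, List.append_nil]
    rw [pv_join_nil_left]
    rw [PySem.Chars.slice_eq_listSlice, PySem.List.slice_from _ (by positivity)]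
    simp [pvF]
  | cons c cs ih =>
    rw [PySem.List.enumerate_cons, List.foldl_cons]
    have hfull : pre ++ c :: cs = (pre ++ [c]) ++ cs := by simp
    set im := if c == '$' then !p else p with him
    by_cases hbr : (im && (c == '&')) = true
    · -- A appends a chunk: c is an in-math '&'
      have hamp : c = '&' := by
        have := (Bool.and_eq_true _ _).mp hbr
        exact beq_iff_eq.mp this.2
      have hcne : ¬ (c = '$') := by rw [hamp]; decide
      have himp : im = p := by
        rw [him, if_neg (by simpa using hcne)]
      have hstep : pvStepA (pre ++ c :: cs) (r, p, (st : Int)) ((pre.length : Int), c)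
          = (r ++ [PySem.Chars.slice (pre ++ c :: cs) (some (st : Int)) (some (pre.length : Int)) ++ pvTemp],
             im, (pre.length : Int) + 1) := by
        simp only [pvStepA, ← him, hbr, if_pos]
      rw [hstep, himp, hfull]
      have hIH := ih (pre ++ [c])
          (r ++ [PySem.Chars.slice ((pre ++ [c]) ++ cs) (some (st : Int)) (some ((pre.length : Nat) : Int)) ++ pvTemp])
          p (pre.length + 1) (by simp)
      simp only [List.length_append, List.length_cons, List.length_nil, Nat.cast_add, Nat.cast_one, zero_add] at hIH
      rw [hIH]
      have hsl : PySem.Chars.slice ((pre ++ [c]) ++ cs) (some (st : Int)) (some (pre.length : Int))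
          = pre.drop st := by
        rw [PySem.Chars.slice_eq_listSlice,
            PySem.List.slice_toNat _ (by positivity) (by positivity)]
        simp only [Int.toNat_natCast]
        rw [List.append_assoc, List.drop_append_of_le_length h]
        exact List.take_left' (by simp)
      rw [hsl]
      have hdrop : (pre ++ [c]).drop (pre.length + 1) = [] := by
        simp
      rw [hdrop]
      have hptrue : p = true := by
        have := (Bool.and_eq_true _ _).mp hbr
        rw [himp] at this; exact this.1
      simp [pvF, hamp, hptrue]
    · -- no chunk appended
      have hstep : pvStepA (pre ++ c :: cs) (r, p, (st : Int)) ((pre.length : Int), c)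
          = (r, im, (st : Int)) := by
        simp only [pvStepA, ← him]
        rw [if_neg (by simpa using hbr)]
      rw [hstep, hfull]
      have hIH := ih (pre ++ [c]) r im st (by simp; omega)
      simp only [List.length_append, List.length_cons, List.length_nil, Nat.cast_add, Nat.cast_one, zero_add] at hIH
      rw [hIH]
      have hdrop : (pre ++ [c]).drop st = pre.drop st ++ [c] :=
        List.drop_append_of_le_length h
      rw [hdrop]
      by_cases hc : c = '$'
      · have : im = !p := by rw [him, hc]; simp
        rw [this]
        simp [pvF, hc]
      · have himp : im = p := by rw [him, if_neg (by simpa using hc)]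
        rw [himp] at hbr ⊢
        have hnot : ¬ (p && (c == '&')) = true := hbr
        simp only [pvF, if_neg hc, if_neg hnot]
        simp

lemma pvA_eq (s : String) :
    replace_ampersand_inside_math_env s = String.ofList (pvF false s.toList) := by
  have hdef : replace_ampersand_inside_math_env s
      = String.ofList (PySem.Chars.join []
          ((((PySem.List.enumerate s.toList ((((0 : Nat) : Int)))).foldl (pvStepA s.toList) ([], false, ((0 : Nat) : Int))).1)
            ++ [PySem.Chars.slice s.toList
                  (some (((PySem.List.enumerate s.toList (((0 : Nat) : Int))).foldl (pvStepA s.toList) ([], false, ((0 : Nat) : Int))).2.2)) none])) := rfl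
  rw [hdef]
  have h := pvA_fold s.toList [] [] false 0 (by simp)
  simp only [List.nil_append, List.length_nil, List.flatten_nil,
    List.drop_nil, List.append_nil, List.nil_append] at h
  rw [h]

-- ===== VERDICT (by name: the statement is the Claim_ definition above) =====
theorem replace_ampersand_inside_math_env_spec : Claim_equal_replace_ampersand_inside_math_env := by
  intro s _
  unfold Spec_replace_ampersand_inside_math_env
  rw [pvA_eq, pvB_eq]
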